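-- pv_equiv track=rewrite | github.com/BrooklynD23/KaggleTeam_Spring26 | src/eda/track_e/common.py | assign_review_volume_tier
-- ===== SOURCE A (Python) =====
-- def assign_review_volume_tier(review_count: int, boundaries: list[int]) -> str:
--     """Map a business review count to a volume tier label.
--
--     boundaries=[10, 50] creates tiers: "<10", "10-50", "50+"
--     """
--     sorted_boundaries = sorted(boundaries)
--     for i, boundary in enumerate(sorted_boundaries):
--         if review_count < boundary:
--             if i == 0:
--                 return f"<{boundary}"
--             return f"{sorted_boundaries[i - 1]}-{boundary}"
--     return f"{sorted_boundaries[-1]}+"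
-- ===== SOURCE B (Python) =====
-- def assign_review_volume_tier(review_count: int, boundaries: list[int]) -> str:
--     """Map a business review count to a volume tier label.
--
--     boundaries=[10, 50] creates tiers: "<10", "10-50", "50+"
--     """
--     sorted_boundaries = sorted(boundaries)
--     # binary search: lo ends as the index of the first boundary strictly
--     # greater than review_count (bisect_right semantics)
--     lo, hi = 0, len(sorted_boundaries)
--     while lo < hi:
--         mid = (lo + hi) // 2
--         if sorted_boundaries[mid] <= review_count:
--             lo = mid + 1
--         else:
--             hi = mid
--     if lo == len(sorted_boundaries):
--         return f"{sorted_boundaries[-1]}+"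
--     if lo == 0:
--         return f"<{sorted_boundaries[0]}"
--     return f"{sorted_boundaries[lo - 1]}-{sorted_boundaries[lo]}"
-- ===== Notes on version B (the rewrite author's own statement) =====
-- stated objective: alternative
-- what changed: Replaced A's linear enumerate scan over the sorted boundaries with a hand-written bisect_right binary search; the tier label is built from the insertion index instead of being returned mid-loop.
import Mathlib
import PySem

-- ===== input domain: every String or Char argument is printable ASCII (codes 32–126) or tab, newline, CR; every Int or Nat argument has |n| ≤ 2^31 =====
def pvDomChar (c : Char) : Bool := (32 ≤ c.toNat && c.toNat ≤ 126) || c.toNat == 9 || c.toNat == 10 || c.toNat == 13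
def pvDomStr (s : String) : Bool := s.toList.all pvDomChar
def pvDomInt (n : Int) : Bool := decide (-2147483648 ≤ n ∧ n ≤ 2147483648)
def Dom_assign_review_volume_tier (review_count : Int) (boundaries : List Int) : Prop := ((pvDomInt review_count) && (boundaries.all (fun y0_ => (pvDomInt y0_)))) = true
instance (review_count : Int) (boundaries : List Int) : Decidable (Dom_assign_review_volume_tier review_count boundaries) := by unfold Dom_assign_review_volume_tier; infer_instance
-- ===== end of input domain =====

-- B replaces A's linear scan over the sorted boundaries with a hand-written bisect_right
-- binary search, building the label from the insertion index (alternative algorithm, same overall cost: the sort dominates).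


-- ===== PORT A =====
-- A's enumerate loop: i is the current index, the last argument the remaining suffix of sb;
-- sorted_boundaries[i-1] is read back from the whole sorted list, exactly as A does
def tierLoopA (review_count : Int) (sb : List Int) : Nat → List Int → Option String
  | _, [] => none
  | i, b :: rest =>
    if review_count < b then
      some (if i = 0 then "<" ++ PySem.Int.toStr b
            else PySem.Int.toStr (sb.getD (i - 1) 0) ++ "-" ++ PySem.Int.toStr b)
    else tierLoopA review_count sb (i + 1) rest

-- the body of A after `sorted_boundaries = sorted(boundaries)`
def tierA (review_count : Int) (sb : List Int) : String :=
  match tierLoopA review_count sb 0 sb with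
  | some s => s
  | none => PySem.Int.toStr (PySem.List.pyGetD sb (-1) 0) ++ "+"   -- sb[-1]: IndexError on [] is outside Pre_

def assign_review_volume_tier (review_count : Int) (boundaries : List Int) : String :=
  tierA review_count (PySem.List.sorted boundaries (fun z => z) false)

-- ===== PORT B =====
-- the while-loop of Source B: bisect_right by binary search
-- fuel only makes the recursion structural; it never runs out: hi - lo shrinks every iteration
def bsLoop (sb : List Int) (x : Int) : Nat → Nat → Nat → Nat
  | 0, lo, _hi => lo
  | fuel + 1, lo, hi =>
    if lo < hi then
      if sb.getD ((lo + hi) / 2) 0 ≤ x then bsLoop sb x fuel ((lo + hi) / 2 + 1) hi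
      else bsLoop sb x fuel lo ((lo + hi) / 2)
    else lo

-- the body of Source B after the sort: label from the insertion index
def tierB (review_count : Int) (sb : List Int) : String :=
  let lo := bsLoop sb review_count sb.length 0 sb.length
  if lo = sb.length then
    PySem.Int.toStr (PySem.List.pyGetD sb (-1) 0) ++ "+"          -- sb[-1]: IndexError on [] is outside Pre_
  else if lo = 0 then "<" ++ PySem.Int.toStr (sb.getD 0 0)
  else PySem.Int.toStr (sb.getD (lo - 1) 0) ++ "-" ++ PySem.Int.toStr (sb.getD lo 0)

def assign_review_volume_tier_alt (review_count : Int) (boundaries : List Int) : String :=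
  tierB review_count (PySem.List.sorted boundaries (fun z => z) false)

-- ===== PRECONDITION & SPEC =====
-- Pre_ excludes only the empty boundaries list, on which both Pythons raise IndexError (sorted_boundaries[-1]).
def Pre_assign_review_volume_tier (review_count : Int) (boundaries : List Int) : Prop :=
  boundaries ≠ []
instance (review_count : Int) (boundaries : List Int) : Decidable (Pre_assign_review_volume_tier review_count boundaries) := by unfold Pre_assign_review_volume_tier; infer_instance

def pvWitness_assign_review_volume_tier : Int × List Int := (25, [10, 50])

def Spec_assign_review_volume_tier (review_count : Int) (boundaries : List Int) (out : String) : Prop := out = assign_review_volume_tier_alt review_count boundaries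
instance (review_count : Int) (boundaries : List Int) (out : String) : Decidable (Spec_assign_review_volume_tier review_count boundaries out) := by unfold Spec_assign_review_volume_tier; infer_instance

-- ===== CLAIM (what is proved, stated in full; the proofs are below) =====
def Claim_equal_assign_review_volume_tier : Prop := ∀ (review_count : Int) (boundaries : List Int), Dom_assign_review_volume_tier review_count boundaries → Pre_assign_review_volume_tier review_count boundaries → Spec_assign_review_volume_tier review_count boundaries (assign_review_volume_tier review_count boundaries)

-- ===== LEMMAS AND PROOFS =====

-- On a nondecreasing list, an element is ≤ x iff its index is below the count of elements ≤ x.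
theorem countP_char (x : Int) : ∀ (sb : List Int), sb.Pairwise (· ≤ ·) →
    ∀ (j : Nat) (hj : j < sb.length),
      (sb[j] ≤ x ↔ j < sb.countP (fun b => decide (b ≤ x))) := by
  intro sb
  induction sb with
  | nil => intro _ j hj; simp at hj
  | cons b rest ih =>
    intro hp j hj
    obtain ⟨hble, hrest⟩ := List.pairwise_cons.mp hp
    rw [List.countP_cons]
    by_cases hbx : b ≤ x
    · simp only [hbx, decide_true, if_true]
      cases j with
      | zero => simp [hbx]
      | succ k =>
        have hk : k < rest.length := by simpa using hj
        rw [List.getElem_cons_succ, ih hrest k hk]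
        omega
    · have hzero : rest.countP (fun b => decide (b ≤ x)) = 0 := by
        rw [List.countP_eq_zero]
        intro y hy
        have := hble y hy
        simp only [decide_eq_true_eq]
        omega
      simp only [hbx, decide_false]
      cases j with
      | zero => simp [hbx, hzero]
      | succ k =>
        have hk : k < rest.length := by simpa using hj
        have hy : ¬ rest[k] ≤ x := by
          have := hble rest[k] (List.getElem_mem hk)
          omega
        simp [hzero, hy]

-- the binary search lands exactly on the count of elements ≤ x
theorem bsLoop_eq (x : Int) (sb : List Int) (hs : sb.Pairwise (· ≤ ·)) :
    ∀ (fuel lo hi : Nat), hi - lo ≤ fuel →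
      lo ≤ sb.countP (fun b => decide (b ≤ x)) →
      sb.countP (fun b => decide (b ≤ x)) ≤ hi → hi ≤ sb.length →
      bsLoop sb x fuel lo hi = sb.countP (fun b => decide (b ≤ x)) := by
  intro fuel
  induction fuel with
  | zero =>
    intro lo hi hd hlo hhi hlen
    simp only [bsLoop]
    omega
  | succ f ih =>
    intro lo hi hd hlo hhi hlen
    simp only [bsLoop]
    split
    · rename_i hlt
      have hmid : (lo + hi) / 2 < sb.length := by omega
      have hget : sb.getD ((lo + hi) / 2) 0 = sb[(lo + hi) / 2] := List.getD_eq_getElem _ _ hmid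
      have hchar := countP_char x sb hs ((lo + hi) / 2) hmid
      rw [hget]
      split
      · rename_i hle
        have h1 : (lo + hi) / 2 < sb.countP (fun b => decide (b ≤ x)) := hchar.mp hle
        exact ih _ _ (by omega) (by omega) hhi hlen
      · rename_i hgt
        have h1 : ¬ (lo + hi) / 2 < sb.countP (fun b => decide (b ≤ x)) :=
          fun h => hgt (hchar.mpr h)
        exact ih _ _ (by omega) hlo (by omega) (by omega)
    · omega

-- A's scan, started at index i with the suffix sb.drop i, produces the label determined by the count
theorem tierLoopA_eq (x : Int) (sb : List Int) (hs : sb.Pairwise (· ≤ ·)) :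
    ∀ (d i : Nat), sb.length - i = d → i ≤ sb.countP (fun b => decide (b ≤ x)) →
      tierLoopA x sb i (sb.drop i) =
        (if sb.countP (fun b => decide (b ≤ x)) = sb.length then none
         else some (if sb.countP (fun b => decide (b ≤ x)) = 0 then
                      "<" ++ PySem.Int.toStr (sb.getD (sb.countP (fun b => decide (b ≤ x))) 0)
                    else PySem.Int.toStr (sb.getD (sb.countP (fun b => decide (b ≤ x)) - 1) 0) ++ "-"
                         ++ PySem.Int.toStr (sb.getD (sb.countP (fun b => decide (b ≤ x))) 0))) := by
  intro d
  induction d using Nat.strong_induction_on with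
  | _ d ih =>
    intro i hd hi
    have hcl : sb.countP (fun b => decide (b ≤ x)) ≤ sb.length := List.countP_le_length
    by_cases hin : i < sb.length
    · have hdrop : sb.drop i = sb[i] :: sb.drop (i + 1) := List.drop_eq_getElem_cons hin
      have hchar := countP_char x sb hs i hin
      have hgi : sb.getD i 0 = sb[i] := List.getD_eq_getElem _ _ hin
      rw [hdrop]
      simp only [tierLoopA]
      by_cases hlt : x < sb[i]
      · have hnot : ¬ sb[i] ≤ x := by omega
        have h1 : ¬ i < sb.countP (fun b => decide (b ≤ x)) := fun h => hnot (hchar.mpr h)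
        have hci : sb.countP (fun b => decide (b ≤ x)) = i := by omega
        rw [if_pos hlt, hci, if_neg (by omega : ¬ i = sb.length), hgi]
      · have hle : sb[i] ≤ x := by omega
        have h1 : i < sb.countP (fun b => decide (b ≤ x)) := hchar.mp hle
        rw [if_neg hlt]
        exact ih (sb.length - (i + 1)) (by omega) (i + 1) rfl (by omega)
    · have hieq : i = sb.length := by omega
      have hc : sb.countP (fun b => decide (b ≤ x)) = sb.length := by omega
      rw [hieq, List.drop_length]
      simp [tierLoopA, hc]

-- ===== VERDICT (by name: the statement is the Claim_ definition above) =====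
theorem assign_review_volume_tier_spec : Claim_equal_assign_review_volume_tier := by
  intro review_count boundaries _hdom _hpre
  unfold Spec_assign_review_volume_tier assign_review_volume_tier assign_review_volume_tier_alt
  set sb := PySem.List.sorted boundaries (fun z => z) false with hsb
  have hs : sb.Pairwise (· ≤ ·) := PySem.List.sorted_pairwise boundaries (fun z => z)
  have hcl : sb.countP (fun b => decide (b ≤ review_count)) ≤ sb.length := List.countP_le_length
  have hbs : bsLoop sb review_count sb.length 0 sb.length = sb.countP (fun b => decide (b ≤ review_count)) :=
    bsLoop_eq review_count sb hs sb.length 0 sb.length (by omega) (Nat.zero_le _) hcl le_rfl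
  have hA := tierLoopA_eq review_count sb hs sb.length 0 rfl (Nat.zero_le _)
  simp only [List.drop_zero] at hA
  unfold tierA tierB
  rw [hA, hbs]
  by_cases hcn : sb.countP (fun b => decide (b ≤ review_count)) = sb.length
  · simp [hcn]
  · by_cases hc0 : sb.countP (fun b => decide (b ≤ review_count)) = 0
    · have h0n : ¬ (0 = sb.length) := by omega
      simp [hc0, h0n]
    · simp [hcn, hc0]
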